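-- pv_equiv track=rewrite | github.com/haolunc/ARC-RL | reference_solutions/solutions/a1aa0c1e.py | transform
-- ===== SOURCE A (Python) =====
-- def transform(grid):
--
--     h = len(grid)
--     w = len(grid[0]) if h else 0
--
--     stripe_rows = []
--     for i, row in enumerate(grid):
--         colour = row[0]
--         if colour != 0 and all(cell == colour for cell in row):
--             stripe_rows.append((i, colour))
--
--     nine_colour = stripe_rows[-1][1]
--     stripe_rows = stripe_rows[:-1]
--
--     ks = []
--     for row_idx, colour in stripe_rows:
--
--         rows_counts = {}
--         for r in range(h):
--             if r == row_idx:
--                 continue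
--             cnt = sum(1 for c in range(w) if grid[r][c] == colour)
--             if cnt:
--                 rows_counts[r] = cnt
--
--         k = sum(1 for cnt in rows_counts.values() if cnt >= 3)
--         ks.append(k)
--
--     out_rows = []
--     for (row_idx, colour), k in zip(stripe_rows, ks):
--
--         first_three = [colour] * min(k, 3) + [0] * (3 - min(k, 3))
--
--         fourth = nine_colour
--
--         out_rows.append(first_three + [fourth, 0])
--
--     has_five = any(grid[r][c] == 5 for r in range(h) for c in range(w))
--     if has_five:
--
--         positive = [(i, k) for i, k in enumerate(ks) if k > 0]
--         if positive:
--             min_k = min(k for i, k in positive)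
--
--             target_i = max(i for i, k in positive if k == min_k)
--             out_rows[target_i][4] = 5
--
--     return out_rows
-- ===== SOURCE B (Python) =====
-- def transform(grid):
--     # One pass tabulates per-row colour counters; each stripe's k is answered by
--     # lookup in a "rows with >= 3 cells of colour c" table, subtracting the stripe row itself.
--     counts = []
--     for row in grid:
--         d = {}
--         for v in row:
--             d[v] = d.get(v, 0) + 1
--         counts.append(d)
--
--     has_five = any(5 in d for d in counts)
--
--     total3 = {}
--     for d in counts:
--         for c, n in d.items():
--             if n >= 3:
--                 total3[c] = total3.get(c, 0) + 1
--
--     stripes = []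
--     for i, (row, d) in enumerate(zip(grid, counts)):
--         if row[0] != 0 and len(d) == 1:
--             stripes.append((i, row[0]))
--
--     nine_colour = stripes[-1][1]
--     stripes = stripes[:-1]
--
--     ks = [total3.get(c, 0) - (1 if counts[i].get(c, 0) >= 3 else 0)
--           for i, c in stripes]
--
--     out = [[c] * min(k, 3) + [0] * (3 - min(k, 3)) + [nine_colour, 0]
--            for (_, c), k in zip(stripes, ks)]
--
--     if has_five:
--         positive = [(i, k) for i, k in enumerate(ks) if k > 0]
--         if positive:
--             min_k = min(k for _, k in positive)
--             target = max(i for i, k in positive if k == min_k)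
--             out[target][4] = 5
--     return out
-- ===== Notes on version B (the rewrite author's own statement) =====
-- stated objective: faster
-- what changed: B builds per-row colour counters and a rows-with-at-least-3-cells-of-colour table in one pass over the grid, answering each stripe's k by a table lookup minus the stripe row's own contribution, instead of A's rescan of the whole grid for every stripe.
-- outside the precondition, e.g. on transform([[2, 2], [0, 2, 2, 2], [3, 3]]): A returns [[0, 0, 0, 3, 0]], B returns [[2, 0, 0, 3, 0]]
import Mathlib
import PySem

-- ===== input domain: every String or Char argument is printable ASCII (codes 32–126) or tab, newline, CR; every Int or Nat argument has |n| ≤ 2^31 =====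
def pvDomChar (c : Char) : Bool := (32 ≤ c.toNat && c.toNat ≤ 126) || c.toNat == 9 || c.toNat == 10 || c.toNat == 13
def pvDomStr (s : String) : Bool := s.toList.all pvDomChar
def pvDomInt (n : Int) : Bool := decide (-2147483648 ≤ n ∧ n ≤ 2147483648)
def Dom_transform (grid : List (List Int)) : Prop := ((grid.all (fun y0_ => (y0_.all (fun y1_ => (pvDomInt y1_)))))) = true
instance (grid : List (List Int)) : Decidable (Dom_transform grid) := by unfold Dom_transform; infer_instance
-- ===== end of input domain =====

-- B replaces A's per-stripe rescans of the whole grid by per-row colour counters and a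
-- "rows with ≥ 3 cells of this colour" table built once, answering each stripe by lookup.

-- ===== PORT A =====
-- sum(1 for c in range(w) if grid[r][c] == colour)   (indices in range under Pre_)
def pvCntA (grid : List (List Int)) (w : Nat) (r colour : Int) : Int :=
  (PySem.List.pyRange 0 (w : Int)).foldl
    (fun a c => if PySem.List.pyGetD (PySem.List.pyGetD grid r []) c 0 == colour then a + 1 else a) 0

-- the rows_counts dict-building loop of A
def pvRowsCountsA (grid : List (List Int)) (h w : Nat) (rowIdx colour : Int) : PySem.Dict Int Int :=
  (PySem.List.pyRange 0 (h : Int)).foldl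
    (fun d r =>
      if r == rowIdx then d
      else if pvCntA grid w r colour != 0 then d.insert r (pvCntA grid w r colour) else d)
    PySem.Dict.empty

-- k = sum(1 for cnt in rows_counts.values() if cnt >= 3)
def pvKA (grid : List (List Int)) (h w : Nat) (rowIdx colour : Int) : Int :=
  (pvRowsCountsA grid h w rowIdx colour).values.foldl
    (fun a cnt => if 3 ≤ cnt then a + 1 else a) 0

-- the stripe_rows collection loop of A
def pvStripesA (grid : List (List Int)) : List (Int × Int) :=
  (PySem.List.enumerate grid).foldl
    (fun acc p =>
      if (PySem.List.pyGet? p.2 0).getD 0 != 0 &&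
         p.2.all (fun cell => cell == (PySem.List.pyGet? p.2 0).getD 0)
      then acc ++ [(p.1, (PySem.List.pyGet? p.2 0).getD 0)] else acc)
    []

-- first_three + [fourth, 0]   (identical expression in both Pythons)
def pvOutRow (colour k nine : Int) : List Int :=
  List.replicate (min k 3).toNat colour ++ List.replicate ((3 - min k 3)).toNat 0 ++ [nine, 0]

-- the final has_five adjustment block (identical code in both Pythons)
def pvFinalFive (outRows : List (List Int)) (ks : List Int) (hasFive : Bool) : List (List Int) :=
  if hasFive then
    let positive := (PySem.List.enumerate ks).foldl
      (fun acc p => if 0 < p.2 then acc ++ [p] else acc) []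
    if positive ≠ [] then
      let minK := ((PySem.List.min? (positive.map (fun p => p.2)) id)).getD 0
      let target := ((PySem.List.max? ((positive.filter (fun p => p.2 == minK)).map (fun p => p.1)) id)).getD 0
      outRows.modify target.toNat (fun row => row.set 4 5)
    else outRows
  else outRows

def transform (grid : List (List Int)) : List (List Int) :=
  let h := grid.length
  let w := if h ≠ 0 then (grid.headD []).length else 0
  let stripeRows := pvStripesA grid
  let nine := ((PySem.List.pyGet? stripeRows (-1)).getD (0, 0)).2
  let stripeRows := PySem.List.slice stripeRows none (some (-1))
  let ks := stripeRows.foldl (fun acc p => acc ++ [pvKA grid h w p.1 p.2]) []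
  let outRows := (stripeRows.zip ks).foldl (fun acc q => acc ++ [pvOutRow q.1.2 q.2 nine]) []
  let hasFive := (PySem.List.pyRange 0 (h : Int)).any (fun r =>
      (PySem.List.pyRange 0 (w : Int)).any (fun c =>
        PySem.List.pyGetD (PySem.List.pyGetD grid r []) c 0 == 5))
  pvFinalFive outRows ks hasFive

-- ===== PORT B =====
-- d = {}; for v in row: d[v] = d.get(v, 0) + 1
def pvCounter (row : List Int) : PySem.Dict Int Int :=
  row.foldl (fun d v => d.insert v (d.getD v 0 + 1)) PySem.Dict.empty

-- total3 tabulation loop of B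
def pvTotal3 (counts : List (PySem.Dict Int Int)) : PySem.Dict Int Int :=
  counts.foldl
    (fun t d => d.items.foldl
      (fun t p => if 3 ≤ p.2 then t.insert p.1 (t.getD p.1 0 + 1) else t) t)
    PySem.Dict.empty

-- stripes collection loop of B (stripe test: row[0] != 0 and len(counter) == 1)
def pvStripesB (grid : List (List Int)) (counts : List (PySem.Dict Int Int)) : List (Int × Int) :=
  (PySem.List.enumerate (grid.zip counts)).foldl
    (fun acc p =>
      if (PySem.List.pyGet? p.2.1 0).getD 0 != 0 && p.2.2.size == 1
      then acc ++ [(p.1, (PySem.List.pyGet? p.2.1 0).getD 0)] else acc)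
    []

def transform_alt (grid : List (List Int)) : List (List Int) :=
  let counts := grid.map pvCounter
  let hasFive := counts.any (fun d => d.contains 5)
  let total3 := pvTotal3 counts
  let stripes := pvStripesB grid counts
  let nine := ((PySem.List.pyGet? stripes (-1)).getD (0, 0)).2
  let stripes := PySem.List.slice stripes none (some (-1))
  let ks := stripes.map (fun p =>
      total3.getD p.2 0 -
        (if 3 ≤ (PySem.List.pyGetD counts p.1 PySem.Dict.empty).getD p.2 0 then 1 else 0))
  let outRows := (stripes.zip ks).map (fun q => pvOutRow q.1.2 q.2 nine)
  pvFinalFive outRows ks hasFive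

-- ===== PRECONDITION & SPEC =====
-- Pre_ restricts to the natural domain: non-empty RECTANGULAR grids containing a uniform nonzero
-- row.  A raises IndexError on empty grids, on grids with a row shorter than the first row, and
-- on grids without a uniform nonzero row; on ragged grids whose later rows are LONGER than the
-- first row A returns a value but silently ignores the extra cells when counting while
-- stripe-testing full rows — malformed input for a grid transform, excluded here.
def Pre_transform (grid : List (List Int)) : Prop :=
  grid ≠ [] ∧ 0 < (grid.headD []).length ∧
  (∀ row ∈ grid, row.length = (grid.headD []).length) ∧
  (∃ row ∈ grid, row.headD 0 ≠ 0 ∧ row.all (fun x => x == row.headD 0))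
instance (grid : List (List Int)) : Decidable (Pre_transform grid) := by
  unfold Pre_transform; infer_instance
def pvWitness_transform : List (List Int) := [[1, 1], [2, 2]]

def Spec_transform (grid : List (List Int)) (out : List (List Int)) : Prop := out = transform_alt grid
instance (grid : List (List Int)) (out : List (List Int)) : Decidable (Spec_transform grid out) := by
  unfold Spec_transform; infer_instance

-- ===== CLAIM (what is proved, stated in full; the proofs are below) =====
def Claim_equal_transform : Prop :=
  ∀ (grid : List (List Int)), Dom_transform grid → Pre_transform grid →
    Spec_transform grid (transform grid)

-- ===== LEMMAS AND PROOFS =====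

theorem pv_head0 (x : Int) (xs : List Int) :
    (PySem.List.pyGet? (x :: xs) 0).getD 0 = x := by
  simp

theorem pvCounter_eq (r : List Int) : pvCounter r = PySem.Dict.counter r :=
  PySem.Dict.foldl_insert_getD_add_one_eq_counter r

theorem pvCounter_getD (r : List Int) (c : Int) :
    (pvCounter r).getD c 0 = (r.count c : Int) := by
  rw [pvCounter_eq, PySem.Dict.getD_counter]

theorem pv_set_len_one {l : List Int} (x : Int) (hnd : l.Nodup) (hx : x ∈ l) :
    l.length = 1 ↔ ∀ z ∈ l, z = x := by
  constructor
  · intro h1 z hz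
    obtain ⟨a, rfl⟩ := List.length_eq_one_iff.mp h1
    simp only [List.mem_singleton] at hx hz
    rw [hz, hx]
  · intro hall
    match l, hnd, hx, hall with
    | [a], _, _, _ => rfl
    | a :: b :: t, hnd, hx, hall =>
      exfalso
      have ha : a = x := hall a (by simp)
      have hb : b = x := hall b (by simp)
      have : a ∉ b :: t := (List.nodup_cons.mp hnd).1
      exact this (by simp [ha, hb])

theorem pv_counter_size_one (x : Int) (xs : List Int) :
    ((pvCounter (x :: xs)).size == 1) = (x :: xs).all (fun y => y == x) := by
  have hsize : (pvCounter (x :: xs)).size = (PySem.Set.ofList (x :: xs)).length := by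
    rw [pvCounter_eq]
    show (PySem.Dict.counter (x :: xs)).items.length = _
    rw [PySem.Dict.items_counter, List.length_map]
  have hx : x ∈ PySem.Set.ofList (x :: xs) :=
    (PySem.Set.mem_ofList _ _).mpr (by simp)
  refine Bool.coe_iff_coe.mp ?_
  simp only [beq_iff_eq, List.all_eq_true, beq_iff_eq, hsize]
  rw [pv_set_len_one x (PySem.Set.nodup_ofList _) hx]
  constructor
  · intro h z hz; exact h z ((PySem.Set.mem_ofList _ _).mpr hz)
  · intro h z hz; exact h z ((PySem.Set.mem_ofList _ _).mp hz)

-- the loop bodies of the two stripe-collecting loops, as named functions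
def pvStepA : List (Int × Int) → Int × List Int → List (Int × Int) := fun acc p =>
  if (PySem.List.pyGet? p.2 0).getD 0 != 0 &&
     p.2.all (fun cell => cell == (PySem.List.pyGet? p.2 0).getD 0)
  then acc ++ [(p.1, (PySem.List.pyGet? p.2 0).getD 0)] else acc

def pvStepB : List (Int × Int) → Int × (List Int × PySem.Dict Int Int) → List (Int × Int) := fun acc p =>
  if (PySem.List.pyGet? p.2.1 0).getD 0 != 0 && p.2.2.size == 1
  then acc ++ [(p.1, (PySem.List.pyGet? p.2.1 0).getD 0)] else acc

theorem pv_stripes_fold (grid : List (List Int)) (hne : ∀ row ∈ grid, row ≠ ([] : List Int)) :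
    ∀ (s : Int) (acc : List (Int × Int)),
      (PySem.List.enumerate grid s).foldl pvStepA acc
        = (PySem.List.enumerate (grid.zip (grid.map pvCounter)) s).foldl pvStepB acc := by
  induction grid with
  | nil => intro s acc; rfl
  | cons row rest ih =>
    intro s acc
    obtain ⟨x, xs, rfl⟩ : ∃ x xs, row = x :: xs := by
      cases row with
      | nil => exact absurd rfl (hne [] (by simp))
      | cons x xs => exact ⟨x, xs, rfl⟩
    simp only [List.map_cons, List.zip_cons_cons, PySem.List.enumerate_cons, List.foldl_cons]
    have hcond : pvStepA acc (s, x :: xs) = pvStepB acc (s, (x :: xs, pvCounter (x :: xs))) := by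
      simp only [pvStepA, pvStepB, pv_head0, pv_counter_size_one]
    rw [hcond]
    exact ih (fun r hr => hne r (List.mem_cons_of_mem _ hr)) (s + 1) _

theorem stripes_eq (grid : List (List Int))
    (hne : ∀ row ∈ grid, row ≠ ([] : List Int)) :
    pvStripesA grid = pvStripesB grid (grid.map pvCounter) :=
  pv_stripes_fold grid hne 0 []

-- A's stripe list as filter-then-map
def pvPA : Int × List Int → Bool := fun p =>
  (PySem.List.pyGet? p.2 0).getD 0 != 0 &&
    p.2.all (fun cell => cell == (PySem.List.pyGet? p.2 0).getD 0)
def pvFA : Int × List Int → Int × Int := fun p => (p.1, (PySem.List.pyGet? p.2 0).getD 0)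

theorem stripesA_filter_map (grid : List (List Int)) :
    pvStripesA grid = ((PySem.List.enumerate grid).filter pvPA).map pvFA := by
  show (PySem.List.enumerate grid).foldl
      (fun acc p => if pvPA p then acc ++ [pvFA p] else acc) [] = _
  simpa using PySem.List.foldl_append_if pvPA pvFA (PySem.List.enumerate grid) []

theorem mem_stripesA (grid : List (List Int)) (p : Int × Int)
    (hp : p ∈ pvStripesA grid) :
    ∃ k : Nat, k < grid.length ∧ p.1 = (k : Int) := by
  rw [stripesA_filter_map] at hp
  obtain ⟨q, hq, rfl⟩ := List.mem_map.mp hp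
  obtain ⟨hqm, -⟩ := List.mem_filter.mp hq
  obtain ⟨k, hk, rfl⟩ := (PySem.List.mem_enumerate_iff grid 0 q).mp hqm
  exact ⟨k, hk, by simp [pvFA]⟩

-- ===== total3 =====

theorem pv_count_filter_row (row : List Int) (c : Int) :
    ((((PySem.Dict.counter row).items.filter (fun p => decide (3 ≤ p.2))).map
        (fun p => p.1)).count c) = if 3 ≤ row.count c then 1 else 0 := by
  rw [PySem.Dict.items_counter, List.filter_map, List.map_map]
  have hid : (fun (p : Int × Int) => p.1) ∘ (fun k => (k, (row.count k : Int))) = id := rfl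
  rw [hid, List.map_id]
  by_cases h3 : 3 ≤ row.count c
  · have hmem : c ∈ (PySem.Set.ofList row).filter
        ((fun (p : Int × Int) => decide (3 ≤ p.2)) ∘ fun k => (k, (row.count k : Int))) := by
      refine List.mem_filter.mpr ⟨(PySem.Set.mem_ofList _ _).mpr ?_, ?_⟩
      · exact List.count_pos_iff.mp (by omega)
      · simp only [Function.comp_apply, decide_eq_true_eq]
        exact_mod_cast h3
    rw [List.count_eq_one_of_mem ((PySem.Set.nodup_ofList row).filter _) hmem, if_pos h3]
  · rw [if_neg h3]
    refine List.count_eq_zero.mpr ?_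
    intro hmem
    obtain ⟨-, hpred⟩ := List.mem_filter.mp hmem
    simp only [Function.comp_apply, decide_eq_true_eq] at hpred
    exact h3 (by exact_mod_cast hpred)

theorem pv_inner_total3 (t : PySem.Dict Int Int) (row : List Int) (c : Int) :
    ((PySem.Dict.counter row).items.foldl
        (fun t p => if 3 ≤ p.2 then t.insert p.1 (t.getD p.1 0 + 1) else t) t).getD c 0
      = t.getD c 0 + (if 3 ≤ row.count c then 1 else 0) := by
  have h1 : (PySem.Dict.counter row).items.foldl
        (fun t p => if 3 ≤ p.2 then t.insert p.1 (t.getD p.1 0 + 1) else t) t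
      = ((PySem.Dict.counter row).items.filter (fun p => decide (3 ≤ p.2))).foldl
          (fun t p => t.insert p.1 (t.getD p.1 0 + 1)) t := by
    rw [List.foldl_filter]
    simp only [decide_eq_true_eq]
  rw [h1, ← List.foldl_map (f := fun (p : Int × Int) => p.1)
        (g := fun (t : PySem.Dict Int Int) k => t.insert k (t.getD k 0 + 1)),
      PySem.Dict.getD_foldl_insert_add_one, pv_count_filter_row]
  split_ifs <;> simp

theorem pv_total3_aux (rows : List (List Int)) (c : Int) :
    ∀ t : PySem.Dict Int Int,
      ((rows.map pvCounter).foldl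
          (fun t d => d.items.foldl
            (fun t p => if 3 ≤ p.2 then t.insert p.1 (t.getD p.1 0 + 1) else t) t) t).getD c 0
        = t.getD c 0 + ((rows.filter (fun row => 3 ≤ row.count c)).length : Int) := by
  induction rows with
  | nil => intro t; simp
  | cons r rs ih =>
    intro t
    simp only [List.map_cons, List.foldl_cons]
    rw [ih, pvCounter_eq, pv_inner_total3, List.filter_cons]
    by_cases h3 : 3 ≤ r.count c
    · simp [h3, add_assoc]
      ring
    · simp [h3]

theorem total3_getD (grid : List (List Int)) (c : Int) :
    (pvTotal3 (grid.map pvCounter)).getD c 0 =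
      ((grid.filter (fun row => 3 ≤ row.count c)).length : Int) := by
  unfold pvTotal3
  rw [pv_total3_aux]
  simp [PySem.Dict.getD]

-- ===== counting helpers =====

theorem pv_countP_range_getD {α : Type} (l : List α) (d : α) (p : α → Bool) :
    (List.range l.length).countP (fun k => p (l.getD k d)) = l.countP p := by
  induction l with
  | nil => rfl
  | cons x xs ih =>
    rw [List.length_cons, List.range_succ_eq_map, List.countP_cons, List.countP_map]
    simp only [List.getD_cons_zero, Function.comp_def, Nat.succ_eq_add_one, List.getD_cons_succ]
    rw [ih, List.countP_cons]
    try omega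

theorem pv_any_range_getD {α : Type} (l : List α) (d : α) (p : α → Bool) :
    (List.range l.length).any (fun k => p (l.getD k d)) = l.any p := by
  induction l with
  | nil => rfl
  | cons x xs ih =>
    rw [List.length_cons, List.range_succ_eq_map, List.any_cons, List.any_map]
    simp only [List.getD_cons_zero, Function.comp_def, Nat.succ_eq_add_one, List.getD_cons_succ]
    rw [ih, List.any_cons]

theorem pv_countP_range_split (h i : Nat) (hi : i < h) (p : Nat → Bool) :
    (List.range h).countP p
      = (List.range h).countP (fun k => p k && !(k == i)) + (if p i then 1 else 0) := by
  induction h with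
  | zero => omega
  | succ n ihn =>
    rw [List.range_succ, List.countP_append, List.countP_append]
    rcases Nat.lt_succ_iff_lt_or_eq.mp hi with h' | rfl
    · have hne : (n == i) = false := by simp; omega
      rw [ihn h']
      simp [List.countP_cons, hne]
      try split_ifs <;> omega
    · have hsame : (List.range i).countP (fun k => p k && !(k == i)) = (List.range i).countP p := by
        refine List.countP_congr ?_
        intro k hk
        have : (k == i) = false := by simp; exact Nat.ne_of_lt (List.mem_range.mp hk)
        simp [this]
      rw [hsame]
      simp [List.countP_cons]

-- ===== per-stripe count =====

theorem pvCntA_eq (grid : List (List Int)) (w : Nat) (r : Nat) (colour : Int)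
    (hr : r < grid.length) (hw : grid[r].length = w) :
    pvCntA grid w (r : Int) colour = (grid[r].count colour : Int) := by
  subst hw
  unfold pvCntA
  have hg : PySem.List.pyGetD grid (r : Int) [] = grid[r] := by
    rw [PySem.List.pyGetD_natCast]
    exact List.getD_eq_getElem grid [] hr
  rw [hg, PySem.List.foldl_pyRange_zero_pyGetD' grid[r] 0
        (fun a x => if x == colour then a + 1 else a) 0,
      PySem.List.foldl_count_if]
  rw [List.count_eq_countP]
  simp

theorem pv_rowsCounts_values (grid : List (List Int)) (h w : Nat) (i c : Int) :
    (pvRowsCountsA grid h w i c).values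
      = ((PySem.List.pyRange 0 (h : Int)).filter
          (fun r => !(r == i) && (pvCntA grid w r c != 0))).map (fun r => pvCntA grid w r c) := by
  unfold pvRowsCountsA
  have hstep : (fun (d : PySem.Dict Int Int) r =>
        if r == i then d
        else if pvCntA grid w r c != 0 then d.insert r (pvCntA grid w r c) else d)
      = (fun (d : PySem.Dict Int Int) r =>
        if (!(r == i) && (pvCntA grid w r c != 0)) = true
        then d.insert r (pvCntA grid w r c) else d) := by
    funext d r
    by_cases h1 : (r == i) = true <;> by_cases h2 : (pvCntA grid w r c != 0) = true <;>
      simp [h1, h2]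
  rw [hstep, ← List.foldl_filter]
  have hfresh : ∀ a ∈ (PySem.List.pyRange 0 (h : Int)).filter
      (fun r => !(r == i) && (pvCntA grid w r c != 0)),
      (PySem.Dict.empty : PySem.Dict Int Int).contains ((fun r => r) a) = false := by
    intro a _; exact PySem.Dict.contains_empty a
  have hnd : (((PySem.List.pyRange 0 (h : Int)).filter
      (fun r => !(r == i) && (pvCntA grid w r c != 0))).map (fun r => r)).Nodup := by
    simpa using (PySem.List.nodup_pyRange_one 0 (h : Int)).filter _
  have hitems := PySem.Dict.items_foldl_insert_fresh
    ((PySem.List.pyRange 0 (h : Int)).filter (fun r => !(r == i) && (pvCntA grid w r c != 0)))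
    (fun r => r) (fun r => pvCntA grid w r c) PySem.Dict.empty hfresh hnd
  show (List.foldl (fun d a => d.insert a (pvCntA grid w a c)) PySem.Dict.empty _).items.map
      (fun p => p.2) = _
  rw [hitems]
  have hemp : (PySem.Dict.empty : PySem.Dict Int Int).items = [] := rfl
  rw [hemp]
  simp [List.map_map, Function.comp_def]

theorem kA_char (grid : List (List Int)) (w i : Nat) (c : Int)
    (hi : i < grid.length) (hrect : ∀ row ∈ grid, row.length = w) :
    pvKA grid grid.length w (i : Int) c
      = ((grid.filter (fun row => 3 ≤ row.count c)).length : Int)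
        - (if 3 ≤ grid[i].count c then 1 else 0) := by
  unfold pvKA
  rw [pv_rowsCounts_values, List.foldl_map]
  have hdec : (fun (x : Int) (y : Int) => if 3 ≤ pvCntA grid w y c then x + 1 else x)
      = (fun (x : Int) (y : Int) =>
          if (fun y => decide (3 ≤ pvCntA grid w y c)) y = true then x + 1 else x) := by
    funext x y
    by_cases h : 3 ≤ pvCntA grid w y c <;> simp [h]
  rw [hdec, PySem.List.foldl_count_if, zero_add,
      List.countP_filter, PySem.List.pyRange_zero_natCast, List.countP_map]
  have hcongr : (List.range grid.length).countP
        ((fun r => decide (3 ≤ pvCntA grid w r c) && (!(r == (i : Int)) && (pvCntA grid w r c != 0)))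
          ∘ (fun k : Nat => (k : Int)))
      = (List.range grid.length).countP
        (fun k => decide (3 ≤ (grid.getD k []).count c) && !(k == i)) := by
    refine List.countP_congr ?_
    intro k hk
    have hk' : k < grid.length := List.mem_range.mp hk
    have hcnt : pvCntA grid w (k : Int) c = (grid[k].count c : Int) :=
      pvCntA_eq grid w k c hk' (hrect _ (List.getElem_mem hk'))
    have hgd : grid.getD k [] = grid[k] := List.getD_eq_getElem grid [] hk'
    simp only [Function.comp_apply, hcnt, hgd, Bool.and_eq_true, decide_eq_true_eq,
      bne_iff_ne, Bool.not_eq_eq_eq_not, Bool.not_true, beq_eq_false_iff_ne, ne_eq,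
      Nat.cast_inj]
    constructor
    · rintro ⟨h3, hne, -⟩
      exact ⟨by exact_mod_cast h3, hne⟩
    · rintro ⟨h3, hne⟩
      have h3' : (3 : Int) ≤ (grid[k].count c : Int) := by exact_mod_cast h3
      refine ⟨h3', hne, ?_⟩
      intro h0
      have h0' : grid[k].count c = 0 := by exact_mod_cast h0
      omega
  rw [hcongr]
  have hsplit := pv_countP_range_split grid.length i hi
    (fun k => decide (3 ≤ (grid.getD k []).count c))
  have hbridge := pv_countP_range_getD grid ([] : List Int)
    (fun row => decide (3 ≤ row.count c))
  have hpi : (grid.getD i []).count c = grid[i].count c := by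
    rw [List.getD_eq_getElem grid [] hi]
  rw [hpi] at hsplit
  rw [← List.countP_eq_length_filter, ← hbridge, hsplit]
  simp only [decide_eq_true_eq]
  split_ifs <;> push_cast <;> omega

theorem kB_char (grid : List (List Int)) (i : Nat) (c : Int) (hi : i < grid.length) :
    (pvTotal3 (grid.map pvCounter)).getD c 0 -
        (if 3 ≤ (PySem.List.pyGetD (grid.map pvCounter) (i : Int) PySem.Dict.empty).getD c 0
         then 1 else 0)
      = ((grid.filter (fun row => 3 ≤ row.count c)).length : Int)
        - (if 3 ≤ grid[i].count c then 1 else 0) := by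
  rw [total3_getD]
  have hg : PySem.List.pyGetD (grid.map pvCounter) (i : Int) PySem.Dict.empty
      = pvCounter grid[i] := by
    rw [PySem.List.pyGetD_natCast]
    rw [List.getD_eq_getElem (grid.map pvCounter) _ (by simpa using hi)]
    simp
  rw [hg, pvCounter_getD]
  have hcast : ((3 : Int) ≤ (grid[i].count c : Int)) ↔ 3 ≤ grid[i].count c := by
    exact_mod_cast Iff.rfl
  simp only [hcast]

-- ===== has_five =====

theorem pv_any5 (row : List Int) : row.any (fun x => x == 5) = row.contains 5 := by
  induction row with
  | nil => rfl
  | cons x xs ih =>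
    rw [List.any_cons, List.contains_cons, ih]
    have hcomm : (x == (5 : Int)) = ((5 : Int) == x) := by
      refine Bool.coe_iff_coe.mp ?_
      rw [beq_iff_eq, beq_iff_eq]
      exact eq_comm
    rw [hcomm]

theorem pv_any_congr {α : Type} (l : List α) (p q : α → Bool)
    (h : ∀ a ∈ l, p a = q a) : l.any p = l.any q := by
  induction l with
  | nil => rfl
  | cons x xs ih =>
    rw [List.any_cons, List.any_cons, h x (by simp), ih (fun a ha => h a (by simp [ha]))]

theorem hasFive_eq (grid : List (List Int)) (w : Nat)
    (hrect : ∀ row ∈ grid, row.length = w) :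
    ((PySem.List.pyRange 0 (grid.length : Int)).any (fun r =>
      (PySem.List.pyRange 0 (w : Int)).any (fun c =>
        PySem.List.pyGetD (PySem.List.pyGetD grid r []) c 0 == 5))) =
    (grid.map pvCounter).any (fun d => d.contains 5) := by
  rw [PySem.List.pyRange_zero_natCast, List.any_map, List.any_map]
  have h2 := pv_any_range_getD grid ([] : List Int)
    (fun row => (PySem.List.pyRange 0 (w : Int)).any (fun c => PySem.List.pyGetD row c 0 == 5))
  have houter : ((fun r => (PySem.List.pyRange 0 (w : Int)).any (fun c =>
        PySem.List.pyGetD (PySem.List.pyGetD grid r []) c 0 == 5)) ∘ (fun k : Nat => (k : Int)))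
      = fun k => (PySem.List.pyRange 0 (w : Int)).any (fun c =>
        PySem.List.pyGetD (grid.getD k []) c 0 == 5) := by
    funext k
    simp [Function.comp_apply, PySem.List.pyGetD_natCast]
  rw [houter, h2]
  refine pv_any_congr _ _ _ ?_
  intro row hrow
  have hw : row.length = w := hrect row hrow
  subst hw
  rw [PySem.List.pyRange_zero_natCast, List.any_map]
  have h3 := pv_any_range_getD row (0 : Int) (fun x => x == 5)
  have hinner : ((fun c => PySem.List.pyGetD row c 0 == 5) ∘ (fun k : Nat => (k : Int)))
      = fun k => (row.getD k 0 == 5) := by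
    funext k
    simp [Function.comp_apply, PySem.List.pyGetD_natCast]
  rw [hinner, h3, pv_any5, Function.comp_apply, pvCounter_eq,
      PySem.Dict.contains_counter]

-- ===== VERDICT (by name: the statement is the Claim_ definition above) =====
theorem transform_spec : Claim_equal_transform := by
  intro grid _ hpre
  obtain ⟨hne0, hW, hrect, -⟩ := hpre
  have hrowne : ∀ row ∈ grid, row ≠ ([] : List Int) := by
    intro row hr hnil
    have hlenr := hrect row hr
    rw [hnil] at hlenr
    simp only [List.length_nil] at hlenr
    omega
  have hlen : grid.length ≠ 0 := by
    simpa [List.length_eq_zero_iff] using hne0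
  unfold Spec_transform transform transform_alt
  simp only [if_pos hlen]
  rw [stripes_eq grid hrowne, PySem.List.slice_to_neg_one]
  have hks : ((pvStripesB grid (grid.map pvCounter)).dropLast).foldl
        (fun acc p => acc ++ [pvKA grid grid.length (grid.headD []).length p.1 p.2]) []
      = ((pvStripesB grid (grid.map pvCounter)).dropLast).map (fun p =>
          (pvTotal3 (grid.map pvCounter)).getD p.2 0 -
            (if 3 ≤ (PySem.List.pyGetD (grid.map pvCounter) p.1 PySem.Dict.empty).getD p.2 0
             then 1 else 0)) := by
    rw [PySem.List.foldl_append_singleton_eq_map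
      (fun p : Int × Int => pvKA grid grid.length (grid.headD []).length p.1 p.2)]
    rw [List.nil_append]
    refine List.map_congr_left ?_
    intro p hp
    have hpS : p ∈ pvStripesA grid := by
      rw [stripes_eq grid hrowne]
      exact List.mem_of_mem_dropLast hp
    obtain ⟨k, hk, hp1⟩ := mem_stripesA grid p hpS
    rw [hp1]
    rw [kA_char grid (grid.headD []).length k p.2 hk hrect,
        kB_char grid k p.2 hk]
  rw [hks]
  rw [PySem.List.foldl_append_singleton_eq_map
    (fun q : (Int × Int) × Int => pvOutRow q.1.2 q.2
      ((PySem.List.pyGet? (pvStripesB grid (grid.map pvCounter)) (-1)).getD (0, 0)).2)]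
  rw [List.nil_append]
  rw [hasFive_eq grid (grid.headD []).length hrect]
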